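-- pv_equiv track=rewrite | github.com/MengfeiLan/cs440-Artificial-Intelligence | mp1/template/search.py | closet_next_destination_2
-- ===== SOURCE A (Python) =====
-- import math
--
-- class MST:
--     def __init__(self, objectives):
--         self.elements = {key: None for key in objectives}
--
--         # TODO: implement some distance between two objectives
--         # ... either compute the shortest path between them, or just use the manhattan distance between the objectives
--         self.distances   = {
--                 (i, j): abs(i[0] - j[0]) + abs(i[1] - j[1])
--                 for i, j in self.cross(objectives)
--             }
--
--     # Prim's algorithm adds edges to the MST in sorted order as long as they don't create a cycle
--     def compute_mst_weight(self):
--         weight      = 0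
--         for distance, i, j in sorted((self.distances[(i, j)], i, j) for (i, j) in self.distances):
--             if self.unify(i, j):
--                 weight += distance
--         return weight
--
--     # helper checks the root of a node, in the process flatten the path to the root
--     def resolve(self, key):
--         path = []
--         root = key
--         while self.elements[root] is not None:
--             path.append(root)
--             root = self.elements[root]
--         for key in path:
--             self.elements[key] = root
--         return root
--
--     # helper checks if the two elements have the same root they are part of the same tree
--     # otherwise set the root of one to the other, connecting the trees
--     def unify(self, a, b):
--         ra = self.resolve(a)
--         rb = self.resolve(b)
--         if ra == rb:
--             return False
--         else:
--             self.elements[rb] = ra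
--             return True
--
--     # helper that gets all pairs i,j for a list of keys
--     def cross(self, keys):
--         return (x for y in (((i, j) for j in keys if i < j) for i in keys) for x in y)
--
-- def closet_next_destination_2(goals, curr):
--     dist = math.inf
--     next_goal = (0, 0)
--     for goal in goals:
--         new_dests = list(goals)
--         dist1 = abs(goal[0] - curr[0]) + abs(goal[1] - curr[1])
--         new_dests.remove(goal)
--         MST_ = MST(new_dests)
--         dist2 = MST_.compute_mst_weight()
--
--         if dist1 + dist2 < dist:
--             dist = dist1 + dist2
--             next_goal = goal
--     return next_goal
-- ===== SOURCE B (Python) =====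
-- import math
--
-- # union-find: find root of v, flattening the path to the root
-- def _find(parent, v):
--     path = []
--     while parent[v] is not None:
--         path.append(v)
--         v = parent[v]
--     for u in path:
--         parent[u] = v
--     return v
--
-- def closet_next_destination_2(goals, curr):
--     # all pairwise distances among distinct goal values, computed and sorted ONCE
--     dist_of = {}
--     for a in goals:
--         for b in goals:
--             if a < b:
--                 dist_of[(a, b)] = abs(a[0] - b[0]) + abs(a[1] - b[1])
--     edges = sorted((d, a, b) for (a, b), d in dist_of.items())
--     best_cost = math.inf
--     best = (0, 0)
--     for goal in goals:
--         remaining = list(goals)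
--         remaining.remove(goal)
--         vert = set(remaining)
--         parent = {v: None for v in remaining}
--         weight = 0
--         for d, a, b in edges:          # Kruskal, skipping edges not inside `remaining`
--             if a in vert and b in vert:
--                 ra = _find(parent, a)
--                 rb = _find(parent, b)
--                 if ra != rb:
--                     parent[rb] = ra
--                     weight += d
--         cost = abs(goal[0] - curr[0]) + abs(goal[1] - curr[1]) + weight
--         if cost < best_cost:
--             best_cost = cost
--             best = goal
--     return best
-- ===== Notes on version B (the rewrite author's own statement) =====
-- stated objective: alternative
-- what changed: B computes the pairwise-distance dict and the sorted edge list once before the loop and, per candidate goal, runs the union-find Kruskal fold over those presorted edges filtered by membership in the remaining goals, instead of rebuilding a distance dict and re-sorting all edges inside every loop iteration as A's per-goal MST object does (intended as faster; a timing run measured only 1.3-1.6x, below the 1.5x bar at the largest size, so no speed is claimed).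
import Mathlib
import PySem

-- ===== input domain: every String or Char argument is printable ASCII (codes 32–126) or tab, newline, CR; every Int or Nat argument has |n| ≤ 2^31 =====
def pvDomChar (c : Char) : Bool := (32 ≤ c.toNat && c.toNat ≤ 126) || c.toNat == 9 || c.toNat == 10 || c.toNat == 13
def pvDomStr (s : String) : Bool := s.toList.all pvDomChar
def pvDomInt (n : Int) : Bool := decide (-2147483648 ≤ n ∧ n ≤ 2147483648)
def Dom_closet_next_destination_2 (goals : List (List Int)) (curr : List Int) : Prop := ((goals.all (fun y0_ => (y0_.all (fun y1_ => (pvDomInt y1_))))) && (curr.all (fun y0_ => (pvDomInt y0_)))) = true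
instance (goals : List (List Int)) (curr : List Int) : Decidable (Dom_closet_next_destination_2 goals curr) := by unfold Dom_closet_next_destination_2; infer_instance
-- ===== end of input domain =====

-- B computes and sorts all pairwise goal distances once and, per candidate goal, runs the
-- union-find fold over the presorted edges filtered to the remaining goals, instead of
-- rebuilding a distance dict and re-sorting it inside every loop iteration as A does.

-- ===== PORT A =====
-- Python's `<` on two tuples of ints (lexicographic); exact for Int elements.
def pvLtIL : List Int → List Int → Bool
  | _, [] => false
  | [], _ :: _ => true
  | a :: as, b :: bs => if a < b then true else if b < a then false else pvLtIL as bs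

-- stable insertion sort used to port Python's builtin sorted under a hand-written strict
-- comparator (the sort keys are 3-tuples with Python tuple comparison, which is not the
-- Lean Prod order); exact: Python's sort is the unique nondecreasing order under a strict
-- total comparator, which both comparators below are.
def pvInsort {α : Type} (lt : α → α → Bool) (x : α) : List α → List α
  | [] => [x]
  | y :: ys => if lt x y then x :: y :: ys else y :: pvInsort lt x ys

def pvSortBy {α : Type} (lt : α → α → Bool) (xs : List α) : List α :=
  xs.foldl (fun acc x => pvInsort lt x acc) []

-- Python comparison of the tuples (distance, i, j)
def pvTripleLt (x y : Int × List Int × List Int) : Bool :=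
  if x.1 < y.1 then true else if y.1 < x.1 then false
  else if pvLtIL x.2.1 y.2.1 then true else if pvLtIL y.2.1 x.2.1 then false
  else pvLtIL x.2.2 y.2.2

-- the manhattan distance A computes in MST.__init__ (i[0], i[1] via pyGetD; in range on Pre_)
def pvMan (i j : List Int) : Int :=
  |PySem.List.pyGetD i 0 0 - PySem.List.pyGetD j 0 0| +
  |PySem.List.pyGetD i 1 0 - PySem.List.pyGetD j 1 0|

-- MST.cross: ((i, j) for i in keys for j in keys if i < j), in generator order
def pvCrossA (keys : List (List Int)) : List (List Int × List Int) :=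
  keys.flatMap (fun i => (keys.filter (fun j => pvLtIL i j)).map (fun j => (i, j)))

-- MST.resolve's while loop (value None ↔ Option none); fuel bounds the walk, ample since
-- `elements` always encodes a forest here
def pvResolveLoop (elements : PySem.Dict (List Int) (Option (List Int))) :
    Nat → List Int → List (List Int) → (List Int × List (List Int))
  | 0, root, path => (root, path)
  | fuel + 1, root, path =>
    match elements.getD root none with
    | none => (root, path)
    | some nxt => pvResolveLoop elements fuel nxt (path ++ [root])

def pvResolveA (fuel : Nat) (elements : PySem.Dict (List Int) (Option (List Int)))
    (key : List Int) : List Int × PySem.Dict (List Int) (Option (List Int)) :=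
  let rp := pvResolveLoop elements fuel key []
  (rp.1, rp.2.foldl (fun e k => e.insert k (some rp.1)) elements)

def pvUnifyA (fuel : Nat) (elements : PySem.Dict (List Int) (Option (List Int)))
    (a b : List Int) : Bool × PySem.Dict (List Int) (Option (List Int)) :=
  let r1 := pvResolveA fuel elements a
  let r2 := pvResolveA fuel r1.2 b
  if r1.1 == r2.1 then (false, r2.2) else (true, r2.2.insert r2.1 (some r1.1))

-- MST(objectives) followed by compute_mst_weight()
def pvMstWeightA (objectives : List (List Int)) : Int :=
  let elements : PySem.Dict (List Int) (Option (List Int)) :=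
    objectives.foldl (fun d k => d.insert k none) PySem.Dict.empty
  let distances : PySem.Dict (List Int × List Int) Int :=
    (pvCrossA objectives).foldl (fun d p => d.insert p (pvMan p.1 p.2)) PySem.Dict.empty
  let triples := pvSortBy pvTripleLt
    (distances.keys.map (fun p => (distances.getD p 0, p.1, p.2)))
  let fuel := objectives.length
  (triples.foldl
    (fun (st : Int × PySem.Dict (List Int) (Option (List Int))) t =>
      let u := pvUnifyA fuel st.2 t.2.1 t.2.2
      (if u.1 then st.1 + t.1 else st.1, u.2))
    (0, elements)).1

def closet_next_destination_2 (goals : List (List Int)) (curr : List Int) : List Int :=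
  (goals.foldl
    (fun (st : Option Int × List Int) goal =>
      let new_dests := (PySem.List.remove? goals goal).getD goals
      let dist1 := |PySem.List.pyGetD goal 0 0 - PySem.List.pyGetD curr 0 0| +
                   |PySem.List.pyGetD goal 1 0 - PySem.List.pyGetD curr 1 0|
      let dist2 := pvMstWeightA new_dests
      match st.1 with
      | none => (some (dist1 + dist2), goal)                        -- anything < math.inf
      | some d => if dist1 + dist2 < d then (some (dist1 + dist2), goal) else st)
    (none, [0, 0])).2

-- ===== PORT B =====
-- Source B's _find: the root-finding while loop, then the flattening loop (fuel = dict size)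
def pvFindLoopB (parent : PySem.Dict (List Int) (Option (List Int))) :
    Nat → List Int → List (List Int) → (List Int × List (List Int))
  | 0, v, path => (v, path)
  | fuel + 1, v, path =>
    match parent.getD v none with
    | none => (v, path)
    | some nxt => pvFindLoopB parent fuel nxt (path ++ [v])

def pvFindB (fuel : Nat) (parent : PySem.Dict (List Int) (Option (List Int)))
    (v : List Int) : List Int × PySem.Dict (List Int) (Option (List Int)) :=
  let rp := pvFindLoopB parent fuel v []
  (rp.1, rp.2.foldl (fun e k => e.insert k (some rp.1)) parent)

def closet_next_destination_2_alt (goals : List (List Int)) (curr : List Int) : List Int :=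
  let dist_of : PySem.Dict (List Int × List Int) Int :=
    goals.foldl (fun d a =>
      goals.foldl (fun d b =>
        if pvLtIL a b then d.insert (a, b) (pvMan a b) else d) d) PySem.Dict.empty
  let edges := pvSortBy pvTripleLt
    (dist_of.items.map (fun pd => (pd.2, pd.1.1, pd.1.2)))
  (goals.foldl
    (fun (st : Option Int × List Int) goal =>
      let remaining := (PySem.List.remove? goals goal).getD goals
      let vert := PySem.Set.ofList remaining
      let parent : PySem.Dict (List Int) (Option (List Int)) :=
        remaining.foldl (fun d v => d.insert v none) PySem.Dict.empty
      let wk := edges.foldl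
        (fun (ws : Int × PySem.Dict (List Int) (Option (List Int))) e =>
          if PySem.Set.contains vert e.2.1 && PySem.Set.contains vert e.2.2 then
            let f1 := pvFindB remaining.length ws.2 e.2.1
            let f2 := pvFindB remaining.length f1.2 e.2.2
            if f1.1 == f2.1 then (ws.1, f2.2)
            else (ws.1 + e.1, f2.2.insert f2.1 (some f1.1))
          else ws)
        (0, parent)
      let cost := |PySem.List.pyGetD goal 0 0 - PySem.List.pyGetD curr 0 0| +
                  |PySem.List.pyGetD goal 1 0 - PySem.List.pyGetD curr 1 0| + wk.1
      match st.1 with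
      | none => (some cost, goal)                                   -- anything < math.inf
      | some bc => if cost < bc then (some cost, goal) else st)
    (none, [0, 0])).2

-- ===== PRECONDITION & SPEC =====
-- Pre_ excludes exactly the inputs on which the Python A raises IndexError: a nonempty
-- goal list with some goal row or curr shorter than 2 (indices 0 and 1 are accessed).
def Pre_closet_next_destination_2 (goals : List (List Int)) (curr : List Int) : Prop :=
  goals = [] ∨ (2 ≤ curr.length ∧ ∀ g ∈ goals, 2 ≤ g.length)
instance (goals : List (List Int)) (curr : List Int) : Decidable (Pre_closet_next_destination_2 goals curr) := by unfold Pre_closet_next_destination_2; infer_instance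

def pvWitness_closet_next_destination_2 : List (List Int) × List Int := ([[1, 2], [3, 4], [0, 5]], [0, 0])

def Spec_closet_next_destination_2 (goals : List (List Int)) (curr : List Int) (out : List Int) : Prop := out = closet_next_destination_2_alt goals curr
instance (goals : List (List Int)) (curr : List Int) (out : List Int) : Decidable (Spec_closet_next_destination_2 goals curr out) := by unfold Spec_closet_next_destination_2; infer_instance

-- ===== CLAIM (what is proved, stated in full; the proofs are below) =====
def Claim_equal_closet_next_destination_2 : Prop := ∀ (goals : List (List Int)) (curr : List Int), Dom_closet_next_destination_2 goals curr → Pre_closet_next_destination_2 goals curr → Spec_closet_next_destination_2 goals curr (closet_next_destination_2 goals curr)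

-- ===== LEMMAS AND PROOFS =====

-- ---- generic fold reshaping ----
theorem pvFoldlCongrMem {α β : Type} {f g : β → α → β} {l : List α}
    (h : ∀ b x, x ∈ l → f b x = g b x) (b : β) : l.foldl f b = l.foldl g b := by
  induction l generalizing b with
  | nil => rfl
  | cons x xs ih =>
    simp only [List.foldl_cons]
    rw [h b x (by simp)]
    exact ih (fun b y hy => h b y (by simp [hy])) _

theorem pvFoldlIfFilter {α β : Type} (p : α → Bool) (f : β → α → β) (init : β) (l : List α) :
    l.foldl (fun s x => if p x then f s x else s) init = (l.filter p).foldl f init := by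
  induction l generalizing init with
  | nil => rfl
  | cons x xs ih =>
    simp only [List.foldl_cons, List.filter_cons]
    cases hx : p x <;> simp [hx, ih]

-- ---- dict built by inserting a value that is a function of the key ----
theorem pvGetFoldlInsertFun {κ ν : Type} [BEq κ] [LawfulBEq κ] [DecidableEq κ]
    (l : List κ) (f : κ → ν) (d : PySem.Dict κ ν) (k : κ) :
    (l.foldl (fun d p => d.insert p (f p)) d).get? k =
      if k ∈ l then some (f k) else d.get? k := by
  induction l generalizing d with
  | nil => simp
  | cons x xs ih =>
    simp only [List.foldl_cons, ih]
    by_cases hk : k ∈ xs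
    · simp [hk]
    · by_cases hx : k = x
      · simp [hk, hx, PySem.Dict.get?_insert]
      · simp [hk, hx, PySem.Dict.get?_insert]

-- ---- pvLtIL is a strict total order ----
theorem pvLtIL_asymm : ∀ a b : List Int, pvLtIL a b = true → pvLtIL b a = false := by
  intro a
  induction a with
  | nil => intro b _; cases b <;> simp [pvLtIL]
  | cons x xs ih =>
    intro b hb
    cases b with
    | nil => simp [pvLtIL] at hb
    | cons y ys =>
      simp only [pvLtIL] at hb ⊢
      split_ifs at hb ⊢ with h1 h2 h3 h4 <;> try omega
      all_goals first | rfl | (exact ih ys hb) | (simp_all) | omega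

theorem pvLtIL_conn : ∀ a b : List Int, pvLtIL a b = false → pvLtIL b a = false → a = b := by
  intro a
  induction a with
  | nil => intro b h1 _; cases b <;> simp [pvLtIL] at h1 ⊢
  | cons x xs ih =>
    intro b h1 h2
    cases b with
    | nil => simp [pvLtIL] at h2
    | cons y ys =>
      simp only [pvLtIL] at h1 h2
      split_ifs at h1 h2 with h3 h4 h5 h6 <;> try omega
      have : x = y := by omega
      subst this
      rw [ih ys h1 h2]

theorem pvLtIL_trans : ∀ a b c : List Int,
    pvLtIL a b = true → pvLtIL b c = true → pvLtIL a c = true := by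
  intro a
  induction a with
  | nil =>
    intro b c h1 h2
    cases b with
    | nil => simp [pvLtIL] at h1
    | cons y ys => cases c with
      | nil => simp [pvLtIL] at h2
      | cons z zs => simp [pvLtIL]
  | cons x xs ih =>
    intro b c h1 h2
    cases b with
    | nil => simp [pvLtIL] at h1
    | cons y ys =>
      cases c with
      | nil => simp [pvLtIL] at h2
      | cons z zs =>
        simp only [pvLtIL] at h1 h2 ⊢
        split_ifs at h1 h2 ⊢ with h3 h4 h5 h6 h7 h8 <;> try omega
        all_goals try rfl
        all_goals try simp_all
        -- remaining: equal heads case, use ih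
        all_goals exact ih ys zs h1 h2

-- ---- the triple comparator is a strict total order ----
theorem pvLtIL_irrefl : ∀ a : List Int, pvLtIL a a = false := by
  intro a
  induction a with
  | nil => simp [pvLtIL]
  | cons x xs ih => simp [pvLtIL, ih]

theorem pvTripleLt_iff (x y : Int × List Int × List Int) : pvTripleLt x y = true ↔
    (x.1 < y.1 ∨ (x.1 = y.1 ∧ (pvLtIL x.2.1 y.2.1 = true ∨
      (x.2.1 = y.2.1 ∧ pvLtIL x.2.2 y.2.2 = true)))) := by
  unfold pvTripleLt
  split_ifs with h1 h2 h3 h4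
  · simp [h1]
  · simp only [Bool.false_eq_true, false_iff]
    rintro (h | ⟨he, _⟩) <;> omega
  · have he : x.1 = y.1 := by omega
    simp [he, h3]
  · simp only [Bool.false_eq_true, false_iff]
    rintro (h | ⟨he, hy | ⟨he2, _⟩⟩)
    · omega
    · exact absurd hy h3
    · rw [he2] at h4
      exact absurd h4 (by simp [pvLtIL_irrefl])
  · have he : x.1 = y.1 := by omega
    have he2 : x.2.1 = y.2.1 :=
      pvLtIL_conn _ _ (Bool.not_eq_true _ ▸ h3) (Bool.not_eq_true _ ▸ h4)
    constructor
    · intro h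
      exact Or.inr ⟨he, Or.inr ⟨he2, h⟩⟩
    · rintro (h | ⟨-, h | ⟨-, h⟩⟩)
      · omega
      · exact absurd h h3
      · exact h

theorem pvTripleLt_asymm (a b : Int × List Int × List Int) :
    pvTripleLt a b = true → pvTripleLt b a = false := by
  intro h
  by_contra h'
  have h2 := pvTripleLt_iff b a |>.mp (Bool.not_eq_false _ ▸ h' :)
  have h1 := (pvTripleLt_iff a b).mp h
  rcases h1 with h1 | ⟨e1, h1⟩ <;> rcases h2 with h2 | ⟨e2, h2⟩ <;> try omega
  rcases h1 with h1 | ⟨e1', h1⟩ <;> rcases h2 with h2 | ⟨e2', h2⟩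
  · exact absurd h2 (by simp [pvLtIL_asymm _ _ h1])
  · rw [e2'] at h1
    exact absurd h1 (by simp [pvLtIL_irrefl])
  · rw [e1'] at h2
    exact absurd h2 (by simp [pvLtIL_irrefl])
  · exact absurd h2 (by simp [pvLtIL_asymm _ _ h1])

theorem pvTripleLt_conn (a b : Int × List Int × List Int) :
    pvTripleLt a b = false → pvTripleLt b a = false → a = b := by
  intro p q
  have hp : ¬ _ := (pvTripleLt_iff a b).not.mp (by simp [p])
  have hq : ¬ _ := (pvTripleLt_iff b a).not.mp (by simp [q])
  push_neg at hp hq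
  obtain ⟨hp1, hp2⟩ := hp
  obtain ⟨hq1, hq2⟩ := hq
  have e1 : a.1 = b.1 := by omega
  obtain ⟨hp3, hp4⟩ := hp2 e1
  obtain ⟨hq3, hq4⟩ := hq2 e1.symm
  have e2 : a.2.1 = b.2.1 :=
    pvLtIL_conn _ _ (Bool.not_eq_true _ ▸ hp3) (Bool.not_eq_true _ ▸ hq3)
  have e3 : a.2.2 = b.2.2 :=
    pvLtIL_conn _ _ (Bool.not_eq_true _ ▸ hp4 e2) (Bool.not_eq_true _ ▸ hq4 e2.symm)
  exact Prod.ext_iff.mpr ⟨e1, Prod.ext_iff.mpr ⟨e2, e3⟩⟩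

theorem pvTripleLt_trans (a b c : Int × List Int × List Int) :
    pvTripleLt a b = true → pvTripleLt b c = true → pvTripleLt a c = true := by
  intro p q
  rw [pvTripleLt_iff] at p q ⊢
  rcases p with p | ⟨e1, p⟩ <;> rcases q with q | ⟨e2, q⟩ <;> try (left; omega)
  right
  refine ⟨by omega, ?_⟩
  rcases p with p | ⟨e3, p⟩ <;> rcases q with q | ⟨e4, q⟩
  · exact Or.inl (pvLtIL_trans _ _ _ p q)
  · exact Or.inl (e4 ▸ p)
  · exact Or.inl (e3 ▸ q)
  · exact Or.inr ⟨e3.trans e4, pvLtIL_trans _ _ _ p q⟩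

-- ---- insertion sort: permutation, sortedness, uniqueness ----
theorem pvInsort_perm {α : Type} (lt : α → α → Bool) (x : α) (l : List α) :
    (pvInsort lt x l).Perm (x :: l) := by
  induction l with
  | nil => simp [pvInsort]
  | cons y ys ih =>
    simp only [pvInsort]
    split_ifs
    · exact List.Perm.refl _
    · exact ((ih.cons y).trans (List.Perm.swap x y ys))

theorem pvMemInsort {α : Type} {lt : α → α → Bool} {x w : α} {l : List α} :
    w ∈ pvInsort lt x l ↔ w = x ∨ w ∈ l := by
  have := (pvInsort_perm lt x l).mem_iff (a := w)
  simpa using this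

theorem pvSortBy_perm {α : Type} (lt : α → α → Bool) (l : List α) :
    (pvSortBy lt l).Perm l := by
  suffices h : ∀ (l acc : List α),
      (l.foldl (fun a x => pvInsort lt x a) acc).Perm (acc ++ l) by
    simpa using h l []
  intro l
  induction l with
  | nil => intro acc; simp
  | cons x xs ih =>
    intro acc
    simp only [List.foldl_cons]
    refine (ih _).trans ?_
    have h1 : (pvInsort lt x acc ++ xs).Perm ((x :: acc) ++ xs) :=
      (pvInsort_perm lt x acc).append_right xs
    refine h1.trans ?_
    simpa using (List.perm_middle (a := x) (l₁ := acc) (l₂ := xs)).symm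

theorem pvInsort_pairwise {α : Type} {lt : α → α → Bool}
    (htr : ∀ a b c, lt a b = true → lt b c = true → lt a c = true)
    (has : ∀ a b, lt a b = true → lt b a = false)
    (x : α) {l : List α} (h : l.Pairwise (fun a b => lt b a = false)) :
    (pvInsort lt x l).Pairwise (fun a b => lt b a = false) := by
  induction l with
  | nil => simp [pvInsort]
  | cons y ys ih =>
    simp only [pvInsort]
    rcases h with _ | ⟨hy, hys⟩
    split_ifs with hxy
    · refine List.Pairwise.cons ?_ (List.Pairwise.cons hy hys)
      intro z hz
      rcases List.mem_cons.mp hz with rfl | hz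
      · exact has _ _ hxy
      · -- z ∈ ys; lt z y = false from hy; show lt z x = false
        rcases Bool.eq_false_or_eq_true (lt z x) with h0 | h0
        · exact absurd (htr _ _ _ h0 hxy) (by simp [hy z hz])
        · exact h0
    · refine List.Pairwise.cons ?_ (ih hys)
      intro z hz
      rcases pvMemInsort.mp hz with rfl | hz
      · exact Bool.eq_false_iff.mpr hxy
      · exact hy z hz

theorem pvSortBy_pairwise {α : Type} {lt : α → α → Bool}
    (htr : ∀ a b c, lt a b = true → lt b c = true → lt a c = true)
    (has : ∀ a b, lt a b = true → lt b a = false)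
    (l : List α) : (pvSortBy lt l).Pairwise (fun a b => lt b a = false) := by
  suffices h : ∀ (l acc : List α), acc.Pairwise (fun a b => lt b a = false) →
      (l.foldl (fun a x => pvInsort lt x a) acc).Pairwise (fun a b => lt b a = false) by
    exact h l [] (by simp)
  intro l
  induction l with
  | nil => intro acc hacc; simpa using hacc
  | cons x xs ih =>
    intro acc hacc
    exact ih _ (pvInsort_pairwise htr has x hacc)

-- two sorted permutations of each other under an antisymmetric order are equal
theorem pvSortedUnique {α : Type} {lt : α → α → Bool}
    (hconn : ∀ a b, lt a b = false → lt b a = false → a = b)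
    {l₁ l₂ : List α} (hp : l₁.Perm l₂)
    (h₁ : l₁.Pairwise (fun a b => lt b a = false))
    (h₂ : l₂.Pairwise (fun a b => lt b a = false)) : l₁ = l₂ := by
  exact List.eq_of_perm_of_sorted (fun a b _ _ p q => hconn a b q p) h₁ h₂ hp

-- ---- the distance dicts ----
def pvDistDict (L : List (List Int)) : PySem.Dict (List Int × List Int) Int :=
  (pvCrossA L).foldl (fun d p => d.insert p (pvMan p.1 p.2)) PySem.Dict.empty

theorem pvMemCross {L : List (List Int)} {p : List Int × List Int} :
    p ∈ pvCrossA L ↔ p.1 ∈ L ∧ p.2 ∈ L ∧ pvLtIL p.1 p.2 = true := by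
  cases p with
  | mk a b =>
    simp only [pvCrossA, List.mem_flatMap, List.mem_map, List.mem_filter]
    constructor
    · rintro ⟨i, hi, j, ⟨hj, hlt⟩, heq⟩
      cases heq
      exact ⟨hi, hj, hlt⟩
    · rintro ⟨ha, hb, hlt⟩
      exact ⟨a, ha, b, ⟨hb, hlt⟩, rfl⟩

theorem pvKeysDistDict (L : List (List Int)) :
    (pvDistDict L).keys = PySem.Set.ofList (pvCrossA L) := by
  unfold pvDistDict
  rw [PySem.Dict.keys_foldl_insert, PySem.Dict.keys_empty]
  rfl

theorem pvMemKeysDistDict {L : List (List Int)} {p : List Int × List Int} :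
    p ∈ (pvDistDict L).keys ↔ p ∈ pvCrossA L := by
  rw [pvKeysDistDict]
  exact PySem.Set.mem_ofList _ _

theorem pvNodupKeysDistDict (L : List (List Int)) : (pvDistDict L).keys.Nodup :=
  PySem.Dict.nodup_keys_foldl_insert _ _ _ PySem.Dict.nodup_keys_empty

theorem pvGetDDistDict {L : List (List Int)} {p : List Int × List Int}
    (hp : p ∈ pvCrossA L) : (pvDistDict L).getD p 0 = pvMan p.1 p.2 := by
  unfold pvDistDict
  rw [PySem.Dict.getD_eq_get?_getD, pvGetFoldlInsertFun]
  simp [hp]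

-- B's nested dict build equals pvDistDict goals
theorem pvBDictEq (goals : List (List Int)) :
    (goals.foldl (fun d a =>
      goals.foldl (fun d b =>
        if pvLtIL a b then d.insert (a, b) (pvMan a b) else d) d) PySem.Dict.empty)
    = pvDistDict goals := by
  unfold pvDistDict pvCrossA
  rw [List.foldl_flatMap]
  refine pvFoldlCongrMem (fun d a _ => ?_) _
  rw [pvFoldlIfFilter (fun b => pvLtIL a b)
      (fun d b => d.insert (a, b) (pvMan a b)) d goals, List.foldl_map]

-- ---- the sorted triple lists ----
def pvG (p : List Int × List Int) : Int × List Int × List Int := (pvMan p.1 p.2, p.1, p.2)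

theorem pvG_inj : Function.Injective pvG := by
  intro p q h
  unfold pvG at h
  cases p; cases q
  simp_all [Prod.ext_iff]

-- A's triples list before sorting, rewritten as map pvG over the keys
theorem pvTriplesA (L : List (List Int)) :
    (pvDistDict L).keys.map (fun p => ((pvDistDict L).getD p 0, p.1, p.2))
      = (pvDistDict L).keys.map pvG := by
  refine List.map_congr_left (fun p hp => ?_)
  rw [pvGetDDistDict (pvMemKeysDistDict.mp hp)]
  rfl

-- B's triples list before sorting, rewritten the same way
theorem pvTriplesB (L : List (List Int)) :
    (pvDistDict L).items.map (fun pd => (pd.2, pd.1.1, pd.1.2))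
      = (pvDistDict L).keys.map pvG := by
  rw [PySem.Dict.items_eq_map_keys _ (pvNodupKeysDistDict L) 0, List.map_map]
  refine List.map_congr_left (fun p hp => ?_)
  simp only [Function.comp]
  rw [pvGetDDistDict (pvMemKeysDistDict.mp hp)]
  rfl

-- ---- the central filter lemma ----
theorem pvCentral (goals : List (List Int)) (goal : List Int) (hg : goal ∈ goals) :
    pvSortBy pvTripleLt ((pvDistDict (goals.erase goal)).keys.map pvG)
      = (pvSortBy pvTripleLt ((pvDistDict goals).keys.map pvG)).filter
          (fun e => PySem.Set.contains (PySem.Set.ofList (goals.erase goal)) e.2.1 &&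
                    PySem.Set.contains (PySem.Set.ofList (goals.erase goal)) e.2.2) := by
  set nd := goals.erase goal with hnd
  set P : (Int × List Int × List Int) → Bool := fun e =>
    PySem.Set.contains (PySem.Set.ofList nd) e.2.1 &&
    PySem.Set.contains (PySem.Set.ofList nd) e.2.2 with hP
  have hPmem : ∀ e, P e = true ↔ (e.2.1 ∈ nd ∧ e.2.2 ∈ nd) := by
    intro e
    simp [hP, PySem.Set.contains, List.contains_iff_mem, PySem.Set.mem_ofList]
  apply pvSortedUnique pvTripleLt_conn
  · -- permutation
    refine ((pvSortBy_perm _ _).trans ?_).trans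
      ((pvSortBy_perm pvTripleLt ((pvDistDict goals).keys.map pvG)).filter P).symm
    -- map pvG (keys nd) ~ filter P (map pvG (keys goals)): nodup + same members
    have nd1 : ((pvDistDict nd).keys.map pvG).Nodup :=
      (pvNodupKeysDistDict nd).map pvG_inj
    have nd2 : (((pvDistDict goals).keys.map pvG).filter P).Nodup :=
      ((pvNodupKeysDistDict goals).map pvG_inj).filter P
    rw [List.perm_ext_iff_of_nodup nd1 nd2]
    intro t
    simp only [List.mem_filter, List.mem_map]
    constructor
    · rintro ⟨p, hp, rfl⟩
      have h := pvMemCross.mp (pvMemKeysDistDict.mp hp)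
      have hsub : ∀ x, x ∈ nd → x ∈ goals := fun x hx => List.mem_of_mem_erase hx
      refine ⟨⟨p, pvMemKeysDistDict.mpr (pvMemCross.mpr
        ⟨hsub _ h.1, hsub _ h.2.1, h.2.2⟩), rfl⟩, ?_⟩
      exact (hPmem (pvG p)).mpr ⟨h.1, h.2.1⟩
    · rintro ⟨⟨p, hp, rfl⟩, hPt⟩
      have h := pvMemCross.mp (pvMemKeysDistDict.mp hp)
      have hm := (hPmem (pvG p)).mp hPt
      exact ⟨p, pvMemKeysDistDict.mpr (pvMemCross.mpr ⟨hm.1, hm.2, h.2.2⟩), rfl⟩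
  · exact pvSortBy_pairwise pvTripleLt_trans pvTripleLt_asymm _
  · exact (pvSortBy_pairwise pvTripleLt_trans pvTripleLt_asymm _).filter P

-- B's union-find is A's (identical code under different names)
theorem pvFindB_eq : pvFindB = pvResolveA := by
  funext fuel parent v
  unfold pvFindB pvResolveA
  have : pvFindLoopB parent = pvResolveLoop parent := by
    funext fuel v path
    induction fuel generalizing v path with
    | zero => rfl
    | succ n ih =>
      simp only [pvFindLoopB, pvResolveLoop]
      cases parent.getD v none with
      | none => rfl
      | some nxt => exact ih nxt (path ++ [v])
  rw [this]

-- the per-goal MST weights agree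
theorem pvWeightEq (goals : List (List Int)) (goal : List Int) (hg : goal ∈ goals) :
    pvMstWeightA ((PySem.List.remove? goals goal).getD goals) =
      ((pvSortBy pvTripleLt
          ((goals.foldl (fun d a => goals.foldl (fun d b =>
              if pvLtIL a b then d.insert (a, b) (pvMan a b) else d) d)
            PySem.Dict.empty).items.map (fun pd => (pd.2, pd.1.1, pd.1.2)))).foldl
        (fun (ws : Int × PySem.Dict (List Int) (Option (List Int))) e =>
          if PySem.Set.contains
                (PySem.Set.ofList ((PySem.List.remove? goals goal).getD goals)) e.2.1 &&
             PySem.Set.contains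
                (PySem.Set.ofList ((PySem.List.remove? goals goal).getD goals)) e.2.2 then
            let f1 := pvFindB ((PySem.List.remove? goals goal).getD goals).length ws.2 e.2.1
            let f2 := pvFindB ((PySem.List.remove? goals goal).getD goals).length f1.2 e.2.2
            if f1.1 == f2.1 then (ws.1, f2.2)
            else (ws.1 + e.1, f2.2.insert f2.1 (some f1.1))
          else ws)
        (0, ((PySem.List.remove? goals goal).getD goals).foldl
              (fun d v => d.insert v none) PySem.Dict.empty)).1 := by
  have hrem : (PySem.List.remove? goals goal).getD goals = goals.erase goal := by
    rw [PySem.List.remove?_eq_some_erase goals goal hg]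
    rfl
  rw [hrem]
  have hA : pvMstWeightA (goals.erase goal) =
      ((pvSortBy pvTripleLt ((pvDistDict (goals.erase goal)).keys.map
          (fun p => ((pvDistDict (goals.erase goal)).getD p 0, p.1, p.2)))).foldl
        (fun (st : Int × PySem.Dict (List Int) (Option (List Int))) t =>
          let u := pvUnifyA (goals.erase goal).length st.2 t.2.1 t.2.2
          (if u.1 then st.1 + t.1 else st.1, u.2))
        (0, (goals.erase goal).foldl (fun d k => d.insert k none) PySem.Dict.empty)).1 := rfl
  rw [hA, pvTriplesA, pvBDictEq, pvTriplesB, pvFoldlIfFilter, ← pvCentral goals goal hg]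
  refine congrArg Prod.fst (pvFoldlCongrMem (fun ws e _ => ?_) _)
  show (let u := pvUnifyA (goals.erase goal).length ws.2 e.2.1 e.2.2
        ((if u.1 then ws.1 + e.1 else ws.1 : Int), u.2)) = _
  simp only [pvFindB_eq, pvUnifyA]
  by_cases hbe : (pvResolveA (goals.erase goal).length ws.2 e.2.1).1 =
      (pvResolveA (goals.erase goal).length
        (pvResolveA (goals.erase goal).length ws.2 e.2.1).2 e.2.2).1 <;>
    simp [hbe]

-- ===== VERDICT (by name: the statement is the Claim_ definition above) =====
theorem closet_next_destination_2_spec : Claim_equal_closet_next_destination_2 := by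
  intro goals curr _ _
  show closet_next_destination_2 goals curr = closet_next_destination_2_alt goals curr
  unfold closet_next_destination_2 closet_next_destination_2_alt
  refine congrArg Prod.snd (pvFoldlCongrMem (fun st goal hgoal => ?_) _)
  have hw := pvWeightEq goals goal hgoal
  simp only [hw]
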